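-- pv_equiv track=rewrite | github.com/xiongdong57/AdventofCode2021 | day10.py | day10_1
-- ===== SOURCE A (Python) =====
-- def reduce_chunk(chunk: str):
--     if any(ch in chunk for ch in ['()', '[]', '{}', '<>']):
--         new_chunk = (chunk
--                      .replace('()', '')
--                      .replace('[]', '')
--                      .replace('{}', '')
--                      .replace('<>', ''))
--         return reduce_chunk(new_chunk)
--     else:
--         return chunk
--
-- def day10_1(data):
--     score = 0
--     score_map = {')': 3, ']': 57, '}': 1197, '>': 25137}
--     for chunk in data:
--         remain_chunk = reduce_chunk(chunk)
--         corupted_chars = [ch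
--                           for ch in remain_chunk
--                           if ch in [')', ']', '}', '>']]
--         if corupted_chars:
--             score += score_map[corupted_chars[0]]
--     return score
-- ===== SOURCE B (Python) =====
-- def day10_1(data):
--     pairs = {')': '(', ']': '[', '}': '{', '>': '<'}
--     points = {')': 3, ']': 57, '}': 1197, '>': 25137}
--     score = 0
--     for chunk in data:
--         stack = []
--         for ch in chunk:
--             if ch in pairs:
--                 if stack and stack[-1] == pairs[ch]:
--                     stack.pop()
--                 else:
--                     score += points[ch]
--                     break
--             else:
--                 stack.append(ch)
--     return score
-- ===== Notes on version B (the rewrite author's own statement) =====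
-- stated objective: faster
-- what changed: Replaces the quadratic repeated string-replace reduction (rescan the whole chunk each round) with a single-pass stack scan that reports the first unmatched closing bracket directly.
import Mathlib
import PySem

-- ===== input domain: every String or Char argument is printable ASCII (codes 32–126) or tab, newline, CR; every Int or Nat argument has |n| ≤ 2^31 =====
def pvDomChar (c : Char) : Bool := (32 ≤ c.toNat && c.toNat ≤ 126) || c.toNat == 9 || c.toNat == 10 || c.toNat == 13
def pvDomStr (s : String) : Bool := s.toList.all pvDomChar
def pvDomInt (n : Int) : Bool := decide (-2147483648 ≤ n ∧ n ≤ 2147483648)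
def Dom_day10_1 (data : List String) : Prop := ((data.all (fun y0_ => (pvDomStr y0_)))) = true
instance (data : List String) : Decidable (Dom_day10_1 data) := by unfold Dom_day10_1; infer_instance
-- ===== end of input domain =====

-- B replaces A's repeated whole-string `replace` reduction by a single-pass stack scan
-- of each chunk (first unmatched closing bracket is scored directly); return values proved equal.

-- ===== PORT A =====
-- Length facts about PySem.Chars.replace.go, cited by reduce_chunk's decreasing_by.
theorem pvGoLenLe (o cl : Char) (fuel : Nat) (l acc : List Char) :
    (PySem.Chars.replace.go [o, cl] [] fuel l acc).length ≤ acc.length + l.length := by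
  induction fuel generalizing l acc with
  | zero => rw [PySem.Chars.replace.go]; simp
  | succ fuel ih =>
    cases l with
    | nil => rw [PySem.Chars.replace.go]; all_goals first | omega | simp
    | cons c t =>
      rw [PySem.Chars.replace.go]
      split
      · exact le_trans (ih (List.drop 2 (c :: t)) acc) (by simp; omega)
      · exact le_trans (ih t (c :: acc)) (by simp; omega)

theorem pvGoLenLt (o cl : Char) (fuel : Nat) (l acc : List Char)
    (hocc : [o, cl] <:+: l) (hfuel : l.length ≤ fuel) :
    (PySem.Chars.replace.go [o, cl] [] fuel l acc).length + 2 ≤ acc.length + l.length := by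
  induction fuel generalizing l acc with
  | zero =>
    interval_cases hl : l.length
    · simp at hl; subst hl; simp at hocc
  | succ fuel ih =>
    cases l with
    | nil => simp at hocc
    | cons c t =>
      rw [PySem.Chars.replace.go]
      split
      · rename_i hpre
        simp only [List.reverse_nil, List.nil_append,
          show ([o, cl].length = 2) from rfl]
        have := pvGoLenLe o cl fuel (List.drop 2 (c :: t)) acc
        have hlen : 2 ≤ (c :: t).length := by
          simpa using (List.isPrefixOf_iff_prefix.mp hpre).length_le
        have hd : (List.drop 2 (c :: t)).length = (c :: t).length - 2 := by
          simp
        omega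
      · rename_i hpre
        have hocc' : [o, cl] <:+: t := by
          rcases List.infix_cons_iff.mp hocc with h | h
          · exact absurd (List.isPrefixOf_iff_prefix.mpr h) (by simpa using hpre)
          · exact h
        have := ih t (c :: acc) hocc' (by simp at hfuel ⊢; omega)
        simp at this ⊢
        omega

theorem pvReplaceLenLe (o cl : Char) (l : List Char) :
    (PySem.Chars.replace l [o, cl] []).length ≤ l.length := by
  rw [PySem.Chars.replace]
  simpa using pvGoLenLe o cl l.length l []

theorem pvReplaceLenLt (o cl : Char) (l : List Char) (h : PySem.Chars.isIn [o, cl] l = true) :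
    (PySem.Chars.replace l [o, cl] []).length + 2 ≤ l.length := by
  rw [PySem.Chars.replace]
  simpa using pvGoLenLt o cl l.length l [] ((PySem.Chars.isIn_iff_infix _ _).mp h) le_rfl

theorem pvGoId (o cl : Char) (fuel : Nat) (l acc : List Char) (h : ¬ [o, cl] <:+: l) :
    PySem.Chars.replace.go [o, cl] [] fuel l acc = acc.reverse ++ l := by
  induction fuel generalizing l acc with
  | zero => rw [PySem.Chars.replace.go]
  | succ fuel ih =>
    cases l with
    | nil => rw [PySem.Chars.replace.go]; all_goals first | omega | simp
    | cons c t =>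
      rw [PySem.Chars.replace.go]
      split
      · rename_i hpre
        exact absurd ((List.isPrefixOf_iff_prefix.mp hpre).isInfix) h
      · rw [ih t (c :: acc) (fun hi => h (List.infix_cons_iff.mpr (Or.inr hi)))]
        simp

theorem pvReplaceId (o cl : Char) (l : List Char) (h : PySem.Chars.isIn [o, cl] l = false) :
    PySem.Chars.replace l [o, cl] [] = l := by
  rw [PySem.Chars.replace]
  simpa using pvGoId o cl l.length l [] ((PySem.Chars.isIn_eq_false_iff _ _).mp h)

-- strict length decrease of A's four chained replaces when some pair occurs, for termination
theorem pvChainLt (l : List Char)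
    (h : PySem.Chars.isIn ['(', ')'] l = true ∨ PySem.Chars.isIn ['[', ']'] l = true ∨
         PySem.Chars.isIn ['{', '}'] l = true ∨ PySem.Chars.isIn ['<', '>'] l = true) :
    (PySem.Chars.replace (PySem.Chars.replace (PySem.Chars.replace
      (PySem.Chars.replace l ['(', ')'] []) ['[', ']'] []) ['{', '}'] []) ['<', '>'] []).length
      < l.length := by
  have le4 := fun m => pvReplaceLenLe '<' '>' m
  have le3 := fun m => pvReplaceLenLe '{' '}' m
  have le2 := fun m => pvReplaceLenLe '[' ']' m
  by_cases c1 : PySem.Chars.isIn ['(', ')'] l = true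
  · have h1 := pvReplaceLenLt '(' ')' l c1
    have := le2 (PySem.Chars.replace l ['(', ')'] [])
    have := le3 (PySem.Chars.replace (PySem.Chars.replace l ['(', ')'] []) ['[', ']'] [])
    have := le4 (PySem.Chars.replace (PySem.Chars.replace (PySem.Chars.replace l ['(', ')'] []) ['[', ']'] []) ['{', '}'] [])
    omega
  · rw [pvReplaceId '(' ')' l (by simpa using c1)]
    by_cases c2 : PySem.Chars.isIn ['[', ']'] l = true
    · have h2 := pvReplaceLenLt '[' ']' l c2
      have := le3 (PySem.Chars.replace l ['[', ']'] [])
      have := le4 (PySem.Chars.replace (PySem.Chars.replace l ['[', ']'] []) ['{', '}'] [])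
      omega
    · rw [pvReplaceId '[' ']' l (by simpa using c2)]
      by_cases c3 : PySem.Chars.isIn ['{', '}'] l = true
      · have h3 := pvReplaceLenLt '{' '}' l c3
        have := le4 (PySem.Chars.replace l ['{', '}'] [])
        omega
      · rw [pvReplaceId '{' '}' l (by simpa using c3)]
        have c4 : PySem.Chars.isIn ['<', '>'] l = true := by tauto
        exact lt_of_lt_of_le (by have := pvReplaceLenLt '<' '>' l c4; omega) le_rfl

def reduce_chunk (chunk : String) : String :=
  if ["()", "[]", "{}", "<>"].any (fun p => PySem.Str.isIn p chunk) then
    reduce_chunk (PySem.Str.replace (PySem.Str.replace (PySem.Str.replace (PySem.Str.replace chunk "()" "") "[]" "") "{}" "") "<>" "")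
  else chunk
termination_by chunk.toList.length
decreasing_by
  have e0 : "".toList = ([] : List Char) := rfl
  have e1 : "()".toList = ['(', ')'] := rfl
  have e2 : "[]".toList = ['[', ']'] := rfl
  have e3 : "{}".toList = ['{', '}'] := rfl
  have e4 : "<>".toList = ['<', '>'] := rfl
  rename_i h
  simp only [List.any_cons, List.any_nil, Bool.or_eq_true, Bool.or_false,
    PySem.Str.isIn_eq, PySem.Str.toList_replace, e0, e1, e2, e3, e4] at h ⊢
  exact pvChainLt chunk.toList (by tauto)

def day10_1 (data : List String) : Int :=
  let scoreMap : PySem.Dict Char Int :=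
    PySem.Dict.ofList [(')', 3), (']', 57), ('}', 1197), ('>', 25137)]
  data.foldl (fun score chunk =>
    let corrupted := (reduce_chunk chunk).toList.filter
      (fun ch => [')', ']', '}', '>'].contains ch)
    match corrupted.head? with
    | some c => score + scoreMap.getD c 0   -- score_map[c]: c is always a key, KeyError unreachable
    | none => score) 0

-- ===== PORT B =====
def pvPairs : PySem.Dict Char Char :=
  PySem.Dict.ofList [(')', '('), (']', '['), ('}', '{'), ('>', '<')]
def pvPoints : PySem.Dict Char Int :=
  PySem.Dict.ofList [(')', 3), (']', 57), ('}', 1197), ('>', 25137)]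

-- the inner `for ch in chunk` loop with its break (top of the Python stack = head here)
def pvScan : List Char → List Char → Option Int
  | _, [] => none
  | stack, ch :: rest =>
    if pvPairs.contains ch then
      match stack with
      | top :: tl =>
        if top == pvPairs.getD ch ' ' then pvScan tl rest
        else some (pvPoints.getD ch 0)   -- points[ch]: ch is always a key here
      | [] => some (pvPoints.getD ch 0)
    else pvScan (ch :: stack) rest

def day10_1_alt (data : List String) : Int :=
  data.foldl (fun score chunk =>
    match pvScan [] chunk.toList with
    | some v => score + v
    | none => score) 0

-- ===== PRECONDITION & SPEC =====
def Spec_day10_1 (data : List String) (out : Int) : Prop := out = day10_1_alt data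
instance (data : List String) (out : Int) : Decidable (Spec_day10_1 data out) := by unfold Spec_day10_1; infer_instance

-- ===== CLAIM (what is proved, stated in full; the proofs are below) =====
def Claim_equal_day10_1 : Prop := ∀ (data : List String), Dom_day10_1 data → Spec_day10_1 data (day10_1 data)

-- ===== LEMMAS AND PROOFS =====

-- proof-only helpers: one scan step, and the list of unmatched closers a full scan meets
def pvStep (st : List Char) (c : Char) : List Char :=
  if pvPairs.contains c then
    match st with
    | top :: tl => if top == pvPairs.getD c ' ' then tl else c :: st
    | [] => c :: st
  else c :: st

def pvFails : List Char → List Char → List Char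
  | _, [] => []
  | st, c :: rest =>
    if pvPairs.contains c then
      match st with
      | top :: tl =>
        if top == pvPairs.getD c ' ' then pvFails tl rest else c :: pvFails (c :: st) rest
      | [] => c :: pvFails (c :: st) rest
    else pvFails (c :: st) rest

def pvCloser (c : Char) : Bool := pvPairs.contains c

def pvPairsList : List (List Char) := [['(', ')'], ['[', ']'], ['{', '}'], ['<', '>']]

theorem pvContainsEq (c : Char) : ([')', ']', '}', '>'].contains c) = pvPairs.contains c := by
  simp only [pvPairs, PySem.Dict.ofList, PySem.Dict.update, List.foldl,
    PySem.Dict.contains_insert, PySem.Dict.contains_empty, List.contains_cons,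
    List.contains_nil, Bool.or_false]
  rw [Bool.eq_iff_iff]
  simp only [Bool.or_eq_true, beq_iff_eq]
  tauto

theorem pvContainsCases (c : Char) (hc : pvPairs.contains c = true) :
    c = ')' ∨ c = ']' ∨ c = '}' ∨ c = '>' := by
  rw [← pvContainsEq] at hc; simpa using hc

theorem pvOpenerNotCloser (c top : Char) (hc : pvPairs.contains c = true)
    (h : (top == pvPairs.getD c ' ') = true) : pvCloser top = false := by
  rcases pvContainsCases c hc with h1 | h1 | h1 | h1 <;> subst h1 <;>
    rw [beq_iff_eq] at h <;> subst h <;> decide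

theorem pvPairMem (c top : Char) (hc : pvPairs.contains c = true)
    (h : (top == pvPairs.getD c ' ') = true) : [top, c] ∈ pvPairsList := by
  rcases pvContainsCases c hc with h1 | h1 | h1 | h1 <;> subst h1 <;>
    rw [beq_iff_eq] at h <;> subst h <;> decide

theorem pvScan_eq_fails (s : List Char) : ∀ st,
    pvScan st s = (pvFails st s).head?.map (fun c => pvPoints.getD c 0) := by
  induction s with
  | nil => intro st; rfl
  | cons c rest ih =>
    intro st
    cases st with
    | nil =>
      simp only [pvScan, pvFails]
      split
      · rfl
      · exact ih _
    | cons top tl =>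
      simp only [pvScan, pvFails]
      split
      · split
        · exact ih _
        · rfl
      · exact ih _

theorem pvFoldFilter (s : List Char) : ∀ st,
    (List.foldl pvStep st s).reverse.filter pvCloser =
      st.reverse.filter pvCloser ++ pvFails st s := by
  induction s with
  | nil => intro st; simp [pvFails]
  | cons c rest ih =>
    intro st
    cases st with
    | nil =>
      simp only [List.foldl, pvStep, pvFails]
      split
      · rename_i hc
        rw [ih (c :: [])]
        simp [pvCloser, hc]
      · rename_i hc
        rw [ih (c :: [])]
        simp [pvCloser, Bool.of_not_eq_true hc]
    | cons top tl =>
      simp only [List.foldl, pvStep, pvFails]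
      split
      · rename_i hc
        split
        · rename_i htop
          rw [ih tl]
          have hnc := pvOpenerNotCloser c top hc htop
          simp [List.filter_append, hnc]
        · rename_i htop
          rw [ih (c :: top :: tl)]
          simp only [List.filter_append, List.filter_cons, List.filter_nil, pvCloser, hc,
            List.reverse_cons, List.append_assoc]
          by_cases ht2 : pvPairs.contains top = true <;> simp [ht2]
      · rename_i hc
        rw [ih (c :: top :: tl)]
        simp [List.filter_append, List.filter_cons, pvCloser, Bool.of_not_eq_true hc]

theorem pvFoldIrred (l : List Char) : ∀ st,
    (∀ p ∈ pvPairsList, ¬ p <:+: (st.reverse ++ l)) →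
      List.foldl pvStep st l = l.reverse ++ st := by
  induction l with
  | nil => intro st _; simp
  | cons c t ih =>
    intro st h
    have hstep : pvStep st c = c :: st := by
      by_cases hc : pvPairs.contains c = true
      · cases st with
        | nil => simp [pvStep, hc]
        | cons top tl =>
          by_cases htop : (top == pvPairs.getD c ' ') = true
          · exact absurd
              (show [top, c] <:+: ((top :: tl).reverse ++ (c :: t)) from
                ⟨tl.reverse, t, by simp⟩)
              (h [top, c] (pvPairMem c top hc htop))
          · simp [pvStep, hc, htop]
      · simp [pvStep, Bool.of_not_eq_true hc]
    have h' : ∀ p ∈ pvPairsList, ¬ p <:+: ((c :: st).reverse ++ t) := by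
      intro p hp
      have := h p hp
      simpa [List.append_assoc] using this
    simp only [List.foldl, hstep]
    rw [ih (c :: st) h']
    simp

theorem pvGoFold (o cl : Char) (hstep : ∀ st, pvStep (pvStep st o) cl = st) (fuel : Nat) :
    ∀ l acc st, List.foldl pvStep st (PySem.Chars.replace.go [o, cl] [] fuel l acc) =
      List.foldl pvStep st (acc.reverse ++ l) := by
  induction fuel with
  | zero => intro l acc st; rw [PySem.Chars.replace.go]
  | succ fuel ih =>
    intro l acc st
    cases l with
    | nil => rw [PySem.Chars.replace.go]; all_goals first | omega | simp
    | cons c t =>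
      rw [PySem.Chars.replace.go]
      split
      · rename_i hpre
        obtain ⟨r, hr⟩ := List.isPrefixOf_iff_prefix.mp hpre
        have hr' : o :: cl :: r = c :: t := by simpa using hr
        obtain ⟨hc, ht⟩ := List.cons_eq_cons.mp hr'
        subst hc; subst ht
        rw [show List.drop [o, cl].length (o :: cl :: r) = r from by simp]
        rw [ih r ([].reverse ++ acc) st]
        simp only [List.reverse_nil, List.nil_append, List.foldl_append]
        rw [show (o :: cl :: r) = [o, cl] ++ r from rfl, List.foldl_append]
        simp only [List.foldl]
        rw [hstep]
      · rw [ih t (c :: acc) st]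
        simp [List.foldl_append]

theorem pvReplaceFold (o cl : Char) (hstep : ∀ st, pvStep (pvStep st o) cl = st)
    (l st : List Char) :
    List.foldl pvStep st (PySem.Chars.replace l [o, cl] []) = List.foldl pvStep st l := by
  rw [PySem.Chars.replace]
  simpa using pvGoFold o cl hstep l.length l [] st

theorem pvReduceFold (s : String) (st : List Char) :
    List.foldl pvStep st (reduce_chunk s).toList = List.foldl pvStep st s.toList := by
  induction s using reduce_chunk.induct with
  | case1 s hcond ih =>
    rw [reduce_chunk, if_pos hcond, ih]
    simp only [PySem.Str.toList_replace,
      show "".toList = ([] : List Char) from rfl,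
      show "()".toList = ['(', ')'] from rfl, show "[]".toList = ['[', ']'] from rfl,
      show "{}".toList = ['{', '}'] from rfl, show "<>".toList = ['<', '>'] from rfl]
    rw [pvReplaceFold '<' '>' (fun _ => rfl), pvReplaceFold '{' '}' (fun _ => rfl),
      pvReplaceFold '[' ']' (fun _ => rfl), pvReplaceFold '(' ')' (fun _ => rfl)]
  | case2 s hcond =>
    rw [reduce_chunk, if_neg hcond]

theorem pvReduceIrred (s : String) :
    (["()", "[]", "{}", "<>"].any (fun p => PySem.Str.isIn p (reduce_chunk s))) = false := by
  induction s using reduce_chunk.induct with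
  | case1 s hcond ih => rw [reduce_chunk, if_pos hcond]; exact ih
  | case2 s hcond => rw [reduce_chunk, if_neg hcond]; simpa using hcond

theorem pvCorruptedEq (s : String) :
    (reduce_chunk s).toList.filter (fun ch => [')', ']', '}', '>'].contains ch) =
      pvFails [] s.toList := by
  have hirr : ∀ p ∈ pvPairsList, ¬ p <:+: (([] : List Char).reverse ++ (reduce_chunk s).toList) := by
    have h := pvReduceIrred s
    simp only [List.any_cons, List.any_nil, Bool.or_eq_false_iff, PySem.Str.isIn_eq,
      show "()".toList = ['(', ')'] from rfl, show "[]".toList = ['[', ']'] from rfl,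
      show "{}".toList = ['{', '}'] from rfl, show "<>".toList = ['<', '>'] from rfl] at h
    intro p hp
    simp only [List.reverse_nil, List.nil_append]
    fin_cases hp <;>
      simp only [← PySem.Chars.isIn_iff_infix] <;> simp [h.1, h.2]
  have h4 := pvFoldIrred (reduce_chunk s).toList [] hirr
  have h2 := pvReduceFold s []
  have hF := pvFoldFilter s.toList []
  rw [← h2] at hF
  rw [h4] at hF
  simp only [List.append_nil, List.reverse_reverse, List.reverse_nil, List.filter_nil,
    List.nil_append] at hF
  rw [← hF]
  congr 1
  funext ch
  exact pvContainsEq ch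

-- ===== VERDICT (by name: the statement is the Claim_ definition above) =====
theorem day10_1_spec : Claim_equal_day10_1 := by
  intro data _
  unfold Spec_day10_1 day10_1 day10_1_alt
  apply List.foldl_ext
  intro score chunk _
  rw [pvScan_eq_fails, ← pvCorruptedEq]
  cases h : ((reduce_chunk chunk).toList.filter (fun ch => [')', ']', '}', '>'].contains ch)).head? with
  | none => simp only [h]; rfl
  | some c => simp only [h]; rfl
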